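-- pv_equiv track=rewrite | github.com/linuxfirstMint/famicom_emulator | tool/gen_opcodes/unofficial.py | remove_addressing_lines
-- ===== SOURCE A (Python) =====
-- from typing import Any, Dict, List
--
-- def remove_addressing_lines(text_list: List[str]) -> List[str]:
--     """
--     Removes the addressing lines from a list of text.
--
--     Args:
--         `text_list` (List[str]): A list of strings representing the text.
--
--     Returns:
--         `List[str]`: A list of strings with the addressing lines removed.
--     """
--     result_list = []
--     i = 0
--     while i < len(text_list):
--         if "=3D" in text_list[i]:
--             i += 1
--             while i < len(text_list) and "Addressing" not in text_list[i]:
--                 i += 1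
--         elif "Addressing" in text_list[i]:
--             i += 1
--             while i < len(text_list) and not text_list[i].strip():
--                 i += 1
--             if i < len(text_list):
--                 i += 1
--         else:
--             result_list.append(text_list[i])
--             i += 1
--     return result_list
-- ===== SOURCE B (Python) =====
-- from typing import List
--
-- def remove_addressing_lines(text_list: List[str]) -> List[str]:
--     NORMAL, TO_ADDR, AFTER = 0, 1, 2
--     state = NORMAL
--     result = []
--     for line in text_list:
--         if state == NORMAL:
--             if "=3D" in line:
--                 state = TO_ADDR
--             elif "Addressing" in line:
--                 state = AFTER
--             else:
--                 result.append(line)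
--         elif state == TO_ADDR:
--             if "Addressing" in line and "=3D" not in line:
--                 state = AFTER
--         else:  # AFTER: skip blank lines, then skip one more line
--             if line.strip():
--                 state = NORMAL
--     return result
-- ===== Notes on version B (the rewrite author's own statement) =====
-- stated objective: alternative
-- what changed: A's index-driven outer while with two nested skipping whiles is replaced by a single flat for-loop over the lines driven by an explicit three-state machine (NORMAL / skip-to-Addressing / skip-blanks-then-one).
import Mathlib
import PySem

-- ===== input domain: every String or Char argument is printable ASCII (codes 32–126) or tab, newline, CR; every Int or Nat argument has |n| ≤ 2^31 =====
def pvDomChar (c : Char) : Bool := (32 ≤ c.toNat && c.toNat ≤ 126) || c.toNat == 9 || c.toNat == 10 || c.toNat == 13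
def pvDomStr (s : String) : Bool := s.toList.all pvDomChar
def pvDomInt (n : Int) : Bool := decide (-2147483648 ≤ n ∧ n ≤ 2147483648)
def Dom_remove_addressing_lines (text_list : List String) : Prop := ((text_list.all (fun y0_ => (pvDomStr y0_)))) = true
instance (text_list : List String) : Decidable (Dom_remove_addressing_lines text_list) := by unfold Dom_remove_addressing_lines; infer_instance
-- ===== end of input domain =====

-- B replaces A's index-based nested while-loops by one flat pass with an explicit
-- three-state machine (alternative decomposition, same cost).


-- ===== PORT A =====
-- A's loops advance an index i; each is ported as structural recursion on a fuel that
-- merely makes the same computation total (fuel tl.length ≥ the number of iterations left).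
-- inner while: `while i < len(text_list) and "Addressing" not in text_list[i]: i += 1`
def pvSkipToAddr (tl : List String) : Nat → Nat → Nat
  | 0, i => i
  | fuel + 1, i =>
    if h : i < tl.length then
      if PySem.Str.isIn "Addressing" tl[i] then i else pvSkipToAddr tl fuel (i + 1)
    else i

-- inner while: `while i < len(text_list) and not text_list[i].strip(): i += 1`
def pvSkipBlanks (tl : List String) : Nat → Nat → Nat
  | 0, i => i
  | fuel + 1, i =>
    if h : i < tl.length then
      if PySem.Str.strip tl[i] == "" then pvSkipBlanks tl fuel (i + 1) else i
    else i

-- outer `while i < len(text_list)` of A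
def pvLoopA (tl : List String) : Nat → Nat → List String
  | 0, _ => []
  | fuel + 1, i =>
    if h : i < tl.length then
      if PySem.Str.isIn "=3D" tl[i] then
        pvLoopA tl fuel (pvSkipToAddr tl tl.length (i + 1))
      else if PySem.Str.isIn "Addressing" tl[i] then
        let j := pvSkipBlanks tl tl.length (i + 1)
        if j < tl.length then pvLoopA tl fuel (j + 1) else pvLoopA tl fuel j
      else
        tl[i] :: pvLoopA tl fuel (i + 1)
    else []

def remove_addressing_lines (text_list : List String) : List String :=
  pvLoopA text_list text_list.length 0

-- ===== PORT B =====
inductive PvState where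
  | normal | toAddr | after
deriving DecidableEq, Repr

-- the single `for line in text_list` pass of B, with the state variable
def pvLoopB : PvState → List String → List String
  | _, [] => []
  | .normal, l :: ls =>
      if PySem.Str.isIn "=3D" l then pvLoopB .toAddr ls
      else if PySem.Str.isIn "Addressing" l then pvLoopB .after ls
      else l :: pvLoopB .normal ls
  | .toAddr, l :: ls =>
      if PySem.Str.isIn "Addressing" l && !PySem.Str.isIn "=3D" l then pvLoopB .after ls
      else pvLoopB .toAddr ls
  | .after, l :: ls =>
      if PySem.Str.strip l == "" then pvLoopB .after ls else pvLoopB .normal ls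

def remove_addressing_lines_alt (text_list : List String) : List String :=
  pvLoopB .normal text_list

-- ===== PRECONDITION & SPEC =====
def Spec_remove_addressing_lines (text_list : List String) (out : List String) : Prop := out = remove_addressing_lines_alt text_list
instance (text_list : List String) (out : List String) : Decidable (Spec_remove_addressing_lines text_list out) := by unfold Spec_remove_addressing_lines; infer_instance

-- ===== CLAIM (what is proved, stated in full; the proofs are below) =====
def Claim_equal_remove_addressing_lines : Prop := ∀ (text_list : List String), Dom_remove_addressing_lines text_list → Spec_remove_addressing_lines text_list (remove_addressing_lines text_list)

-- ===== LEMMAS AND PROOFS =====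



-- auxiliary base facts at a position past the end of the list
theorem pvLoopA_past (tl : List String) (k i : Nat) (h : ¬ i < tl.length) :
    pvLoopA tl k i = [] := by
  cases k <;> simp [pvLoopA, h]

theorem pvSkipToAddr_past (tl : List String) (m i : Nat) (h : ¬ i < tl.length) :
    pvSkipToAddr tl m i = i := by
  cases m <;> simp [pvSkipToAddr, h]

theorem pvSkipBlanks_past (tl : List String) (m i : Nat) (h : ¬ i < tl.length) :
    pvSkipBlanks tl m i = i := by
  cases m <;> simp [pvSkipBlanks, h]

-- Mutual invariant: A resumed at index i in each of its three control positions equals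
-- B's state machine run on the suffix `tl.drop i` (fuels only need to be adequate).
theorem pvLoop_corr (tl : List String) :
    ∀ n i, tl.length - i ≤ n →
      ((∀ k, tl.length - i ≤ k → pvLoopA tl k i = pvLoopB .normal (tl.drop i)) ∧
       (∀ m k, tl.length - i ≤ m → tl.length - i ≤ k →
          pvLoopA tl k (pvSkipToAddr tl m i) = pvLoopB .toAddr (tl.drop i)) ∧
       (∀ m k, tl.length - i ≤ m → tl.length - (i + 1) ≤ k →
          (if pvSkipBlanks tl m i < tl.length then pvLoopA tl k (pvSkipBlanks tl m i + 1)
           else pvLoopA tl k (pvSkipBlanks tl m i)) = pvLoopB .after (tl.drop i))) := by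
  intro n
  induction n with
  | zero =>
      intro i hi
      have h : ¬ i < tl.length := by omega
      have hdrop : tl.drop i = [] := List.drop_eq_nil_of_le (by omega)
      refine ⟨?_, ?_, ?_⟩
      · intro k _; rw [pvLoopA_past tl k i h, hdrop, pvLoopB]
      · intro m k _ _
        rw [pvSkipToAddr_past tl m i h, pvLoopA_past tl k i h, hdrop, pvLoopB]
      · intro m k _ _
        rw [pvSkipBlanks_past tl m i h, hdrop, pvLoopB]
        simp only [h, if_false, pvLoopA_past tl k i h]
  | succ n ih =>
      intro i hi
      by_cases h : i < tl.length
      · have hdrop : tl.drop i = tl[i] :: tl.drop (i + 1) := List.drop_eq_getElem_cons h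
        obtain ⟨ihN, ihT, ihF⟩ := ih (i + 1) (by omega)
        refine ⟨?_, ?_, ?_⟩
        · -- NORMAL position
          intro k hk
          obtain ⟨k', rfl⟩ : ∃ k', k = k' + 1 := ⟨k - 1, by omega⟩
          rw [pvLoopA, hdrop, pvLoopB]
          simp only [h, dif_pos]
          by_cases h3 : PySem.Str.isIn "=3D" tl[i] = true
          · simp only [h3, if_pos]
            exact ihT tl.length k' (by omega) (by omega)
          · simp only [h3, if_false, Bool.false_eq_true]
            by_cases hA : PySem.Str.isIn "Addressing" tl[i] = true
            · simp only [hA, if_true]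
              exact ihF tl.length k' (by omega) (by omega)
            · simp only [hA, if_false, Bool.false_eq_true]
              rw [ihN k' (by omega)]
        · -- skip-to-Addressing position
          intro m k hm hk
          obtain ⟨m', rfl⟩ : ∃ m', m = m' + 1 := ⟨m - 1, by omega⟩
          rw [pvSkipToAddr, hdrop, pvLoopB]
          simp only [h, dif_pos]
          by_cases hA : PySem.Str.isIn "Addressing" tl[i] = true
          · simp only [hA, if_true, Bool.true_and]
            obtain ⟨k', rfl⟩ : ∃ k', k = k' + 1 := ⟨k - 1, by omega⟩
            by_cases h3 : PySem.Str.isIn "=3D" tl[i] = true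
            · -- the Addressing line also contains =3D: A re-enters the =3D branch
              rw [pvLoopA]
              simp only [h, dif_pos, h3, if_pos]
              simp only [Bool.not_true, if_false, Bool.false_eq_true]
              exact ihT tl.length k' (by omega) (by omega)
            · -- plain Addressing line: A takes its Addressing branch
              rw [pvLoopA]
              simp only [h, dif_pos, h3, if_false, Bool.false_eq_true, hA, if_true]
              simp only [Bool.not_false, if_true]
              exact ihF tl.length k' (by omega) (by omega)
          · simp only [hA, if_false, Bool.false_eq_true, Bool.false_and]
            exact ihT m' k (by omega) (by omega)
        · -- skip-blanks-then-one position
          intro m k hm hk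
          obtain ⟨m', rfl⟩ : ∃ m', m = m' + 1 := ⟨m - 1, by omega⟩
          rw [pvSkipBlanks, hdrop, pvLoopB]
          simp only [h, dif_pos]
          by_cases hb : (PySem.Str.strip tl[i] == "") = true
          · simp only [hb, if_true]
            exact ihF m' k (by omega) (by omega)
          · simp only [hb, if_false, Bool.false_eq_true, h, if_true]
            exact ihN k (by omega)
      · have hdrop : tl.drop i = [] := List.drop_eq_nil_of_le (by omega)
        refine ⟨?_, ?_, ?_⟩
        · intro k _; rw [pvLoopA_past tl k i h, hdrop, pvLoopB]
        · intro m k _ _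
          rw [pvSkipToAddr_past tl m i h, pvLoopA_past tl k i h, hdrop, pvLoopB]
        · intro m k _ _
          rw [pvSkipBlanks_past tl m i h, hdrop, pvLoopB]
          simp only [h, if_false, pvLoopA_past tl k i h]

-- ===== VERDICT (by name: the statement is the Claim_ definition above) =====
theorem remove_addressing_lines_spec : Claim_equal_remove_addressing_lines := by
  intro tl _
  unfold Spec_remove_addressing_lines remove_addressing_lines remove_addressing_lines_alt
  have := ((pvLoop_corr tl tl.length 0 (by omega)).1) tl.length (by omega)
  simpa using this
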